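-- pv_equiv track=rewrite | github.com/kiber42/adventofcode24 | day22.py | part_two
-- ===== SOURCE A (Python) =====
-- from collections import defaultdict
--
-- def evolve(secret, n = 1):
--     for _ in range(n):
--         secret = (secret ^ (secret << 6)) % 0x1000000
--         secret ^= secret >> 5
--         secret ^= secret << 11
--     return secret % 0x1000000
--
-- def part_two(secrets):
--     bananas = defaultdict(lambda: 0)
--     for secret in secrets:
--         seen = set()
--         def is_new_combination(combo):
--             n = len(seen)
--             seen.add(combo)
--             return len(seen) > n
--         deltas = []
--         for _ in range(2000):
--             prev, secret = secret, evolve(secret)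
--             deltas.append((secret % 10) - (prev % 10))
--             if len(deltas) < 4:
--                 continue
--             combo = tuple(deltas)
--             if is_new_combination(combo):
--                 bananas[combo] += secret % 10
--             deltas = deltas[1:]
--     return max(bananas.values())
-- ===== SOURCE B (Python) =====
-- def part_two(secrets):
--     bananas = {}
--     for secret in secrets:
--         # pass 1: the 2001 prices (initial secret included)
--         prices = [secret % 10]
--         s = secret
--         for _ in range(2000):
--             s = (s ^ (s << 6)) % 0x1000000
--             s ^= s >> 5
--             s = (s ^ (s << 11)) % 0x1000000
--             prices.append(s % 10)
--         # pass 2: scan the 4-delta windows, first occurrence per buyer wins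
--         seen = set()
--         for i in range(4, 2001):
--             key = (prices[i - 3] - prices[i - 4], prices[i - 2] - prices[i - 3],
--                    prices[i - 1] - prices[i - 2], prices[i] - prices[i - 1])
--             if key not in seen:
--                 seen.add(key)
--                 bananas[key] = bananas.get(key, 0) + prices[i]
--     return max(bananas.values())
-- ===== Notes on version B (the rewrite author's own statement) =====
-- stated objective: alternative
-- what changed: A fuses price generation, the sliding 4-delta window and the dedup/accumulate logic into one streaming loop per buyer; B splits each buyer into two differently-shaped passes: first build the full 2001-entry price list, then scan indices 4..2000 recomputing each window from four consecutive differences of that list.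
import Mathlib
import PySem

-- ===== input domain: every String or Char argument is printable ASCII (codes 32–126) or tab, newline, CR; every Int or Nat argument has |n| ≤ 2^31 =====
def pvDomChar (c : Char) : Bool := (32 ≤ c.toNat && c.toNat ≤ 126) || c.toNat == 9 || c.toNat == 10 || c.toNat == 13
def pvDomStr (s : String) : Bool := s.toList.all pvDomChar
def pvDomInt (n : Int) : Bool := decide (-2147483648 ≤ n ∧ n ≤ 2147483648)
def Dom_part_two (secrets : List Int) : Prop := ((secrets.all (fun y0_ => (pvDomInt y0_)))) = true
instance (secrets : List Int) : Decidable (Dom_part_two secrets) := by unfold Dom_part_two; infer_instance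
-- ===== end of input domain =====

-- B separates price-generation from window-scanning into two passes over an explicit price list,
-- instead of A's fused streaming loop with a sliding deltas window (objective: alternative decomposition).
-- Python's dict/set are hash tables; they are ported as Std.HashMap/Std.HashSet. This is exact here:
-- the programs use them only through membership, len, first-insertion dedup, getD/insert and
-- max(values()), all independent of iteration order.

-- the 4-delta window key, a Python 4-tuple
abbrev PKey : Type := Int × Int × Int × Int

-- ===== PORT A =====
-- helper evolve: the loop body, then the final % 0x1000000.
-- Python '<<'/'>>' on int are Lean's '<<<'/'>>>' on Int; '^' is PySem.Int.bxor (exact on negatives).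
def evolveLoop : Nat → Int → Int
  | 0, s => s
  | n+1, s =>
    let s1 := PySem.Int.mod (PySem.Int.bxor s (s <<< (6:Nat))) 16777216
    let s2 := PySem.Int.bxor s1 (s1 >>> (5:Nat))
    let s3 := PySem.Int.bxor s2 (s2 <<< (11:Nat))
    evolveLoop n s3

def evolve (secret : Int) (n : Int) : Int :=
  PySem.Int.mod (evolveLoop n.toNat secret) 16777216

-- the 'for _ in range(2000)' loop of part_two, state = (secret, deltas, seen, bananas)
def aLoop : Nat → Int → List Int → Std.HashSet PKey → Std.HashMap PKey Int →
    Std.HashMap PKey Int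
  | 0, _, _, _, bananas => bananas
  | n+1, secret, deltas, seen, bananas =>
    let prev := secret
    let secret' := evolve secret 1
    let deltas' := deltas ++ [PySem.Int.mod secret' 10 - PySem.Int.mod prev 10]
    if deltas'.length < 4 then
      aLoop n secret' deltas' seen bananas
    else
      -- combo = tuple(deltas)  (deltas has exactly 4 entries here)
      let combo : PKey := (PySem.List.pyGetD deltas' 0 0, PySem.List.pyGetD deltas' 1 0,
        PySem.List.pyGetD deltas' 2 0, PySem.List.pyGetD deltas' 3 0)
      -- is_new_combination: add to seen, compare the lengths
      let n0 := seen.size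
      let seen' := seen.insert combo
      if seen'.size > n0 then
        aLoop n secret' (PySem.List.slice deltas' (some 1) none) seen'
          -- defaultdict: bananas[combo] += secret' % 10
          (bananas.insert combo (bananas.getD combo 0 + PySem.Int.mod secret' 10))
      else
        aLoop n secret' (PySem.List.slice deltas' (some 1) none) seen' bananas

def part_two (secrets : List Int) : Int :=
  let bananas := secrets.foldl
    (fun bananas secret => aLoop 2000 secret [] (∅ : Std.HashSet PKey) bananas)
    (∅ : Std.HashMap PKey Int)
  match PySem.List.max? bananas.values (fun v => v) with
  | some m => m
  | none => 0   -- Python max([]) raises ValueError: excluded by Pre_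

-- ===== PORT B =====
-- one pseudorandom step (B folds the final mod into the step)
def stepB (s : Int) : Int :=
  let t1 := PySem.Int.mod (PySem.Int.bxor s (s <<< (6:Nat))) 16777216
  let t2 := PySem.Int.bxor t1 (t1 >>> (5:Nat))
  PySem.Int.mod (PySem.Int.bxor t2 (t2 <<< (11:Nat))) 16777216

-- pass 1: build the 2001-entry price list (initial secret's price included)
def buildPrices : Nat → Int → List Int → List Int
  | 0, _, prices => prices
  | n+1, s, prices =>
    let s' := stepB s
    buildPrices n s' (prices ++ [PySem.Int.mod s' 10])

-- the 4-delta window ending at index i (prices[i-3]-prices[i-4], …); indices are always in range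
def bKey (prices : List Int) (i : Int) : PKey :=
  (PySem.List.pyGetD prices (i-3) 0 - PySem.List.pyGetD prices (i-4) 0,
   PySem.List.pyGetD prices (i-2) 0 - PySem.List.pyGetD prices (i-3) 0,
   PySem.List.pyGetD prices (i-1) 0 - PySem.List.pyGetD prices (i-2) 0,
   PySem.List.pyGetD prices i 0 - PySem.List.pyGetD prices (i-1) 0)

-- pass 2: 'for i in range(4, 2001)', first occurrence of a window per buyer wins
def bScan (prices : List Int) : List Int → Std.HashSet PKey → Std.HashMap PKey Int →
    Std.HashMap PKey Int
  | [], _, bananas => bananas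
  | i :: rest, seen, bananas =>
    let key := bKey prices i
    if seen.contains key then
      bScan prices rest seen bananas
    else
      bScan prices rest (seen.insert key)
        (bananas.insert key (bananas.getD key 0 + PySem.List.pyGetD prices i 0))

def part_two_alt (secrets : List Int) : Int :=
  let bananas := secrets.foldl
    (fun bananas secret =>
      bScan (buildPrices 2000 secret [PySem.Int.mod secret 10])
        (PySem.List.pyRange 4 2001 1) (∅ : Std.HashSet PKey) bananas)
    (∅ : Std.HashMap PKey Int)
  match PySem.List.max? bananas.values (fun v => v) with
  | some m => m
  | none => 0   -- B's Python likewise raises on empty input (outside Pre_)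

-- ===== PRECONDITION & SPEC =====
-- Pre_ excludes only the empty list, on which Python's max() raises ValueError (in A and in B).
def Pre_part_two (secrets : List Int) : Prop := secrets ≠ []
instance (secrets : List Int) : Decidable (Pre_part_two secrets) := by
  unfold Pre_part_two; infer_instance
def pvWitness_part_two : List Int := ([123])

def Spec_part_two (secrets : List Int) (out : Int) : Prop := out = part_two_alt secrets
instance (secrets : List Int) (out : Int) : Decidable (Spec_part_two secrets out) := by
  unfold Spec_part_two; infer_instance

-- ===== CLAIM (what is proved, stated in full; the proofs are below) =====
def Claim_equal_part_two : Prop :=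
  ∀ (secrets : List Int), Dom_part_two secrets → Pre_part_two secrets →
    Spec_part_two secrets (part_two secrets)

-- ===== LEMMAS AND PROOFS =====

-- price after k evolutions (k = 0 is the initial secret's own price)
def priceAt (secret : Int) (k : Nat) : Int :=
  if k = 0 then PySem.Int.mod secret 10 else PySem.Int.mod (stepB^[k] secret) 10

def deltaAt (secret : Int) (j : Nat) : Int := priceAt secret (j+1) - priceAt secret j

-- common reference scan: process the windows ending at indices j+4, j+5, …, j+3+m
def mathScan (secret : Int) : Nat → Nat → Std.HashSet PKey → Std.HashMap PKey Int →
    Std.HashMap PKey Int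
  | 0, _, _, bananas => bananas
  | m+1, j, seen, bananas =>
    let key : PKey := (deltaAt secret j, deltaAt secret (j+1), deltaAt secret (j+2),
      deltaAt secret (j+3))
    if key ∈ seen then
      mathScan secret m (j+1) seen bananas
    else
      mathScan secret m (j+1) (seen.insert key)
        (bananas.insert key (bananas.getD key 0 + priceAt secret (j+4)))

lemma evolve_one (s : Int) : evolve s 1 = stepB s := rfl

lemma aLoop_succ (n : Nat) (secret : Int) (deltas : List Int) (seen : Std.HashSet PKey)
    (bananas : Std.HashMap PKey Int) :
    aLoop (n+1) secret deltas seen bananas =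
      (if (deltas ++ [PySem.Int.mod (evolve secret 1) 10 - PySem.Int.mod secret 10]).length < 4 then
        aLoop n (evolve secret 1)
          (deltas ++ [PySem.Int.mod (evolve secret 1) 10 - PySem.Int.mod secret 10]) seen bananas
      else
        let deltas' := deltas ++ [PySem.Int.mod (evolve secret 1) 10 - PySem.Int.mod secret 10]
        let combo : PKey := (PySem.List.pyGetD deltas' 0 0, PySem.List.pyGetD deltas' 1 0,
          PySem.List.pyGetD deltas' 2 0, PySem.List.pyGetD deltas' 3 0)
        if (seen.insert combo).size > seen.size then
          aLoop n (evolve secret 1) (PySem.List.slice deltas' (some 1) none) (seen.insert combo)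
            (bananas.insert combo (bananas.getD combo 0 + PySem.Int.mod (evolve secret 1) 10))
        else
          aLoop n (evolve secret 1) (PySem.List.slice deltas' (some 1) none) (seen.insert combo)
            bananas) := rfl

lemma aLoop_sim (secret : Int) : ∀ (m j : Nat) (seen1 seen2 : Std.HashSet PKey)
    (bananas : Std.HashMap PKey Int), (∀ x : PKey, x ∈ seen1 ↔ x ∈ seen2) →
    aLoop m (stepB^[j+3] secret)
      [deltaAt secret j, deltaAt secret (j+1), deltaAt secret (j+2)] seen1 bananas
      = mathScan secret m j seen2 bananas := by
  intro m
  induction m with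
  | zero => intro j seen1 seen2 bananas _; rfl
  | succ m ih =>
    intro j seen1 seen2 bananas hss
    have hsec : evolve (stepB^[j+3] secret) 1 = stepB^[j+4] secret := by
      rw [evolve_one, ← Function.iterate_succ_apply' stepB (j+3) secret]
    have hd : PySem.Int.mod (stepB^[j+4] secret) 10 - PySem.Int.mod (stepB^[j+3] secret) 10
        = deltaAt secret (j+3) := by
      simp [deltaAt, priceAt]
    rw [aLoop_succ, hsec, hd]
    rw [if_neg (by simp)]
    simp only []
    have hcombo : ((PySem.List.pyGetD ([deltaAt secret j, deltaAt secret (j+1),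
          deltaAt secret (j+2)] ++ [deltaAt secret (j+3)]) 0 0,
        PySem.List.pyGetD ([deltaAt secret j, deltaAt secret (j+1),
          deltaAt secret (j+2)] ++ [deltaAt secret (j+3)]) 1 0,
        PySem.List.pyGetD ([deltaAt secret j, deltaAt secret (j+1),
          deltaAt secret (j+2)] ++ [deltaAt secret (j+3)]) 2 0,
        PySem.List.pyGetD ([deltaAt secret j, deltaAt secret (j+1),
          deltaAt secret (j+2)] ++ [deltaAt secret (j+3)]) 3 0) : PKey)
        = (deltaAt secret j, deltaAt secret (j+1), deltaAt secret (j+2), deltaAt secret (j+3)) := by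
      simp [pysem]
    have hslice : PySem.List.slice
        ([deltaAt secret j, deltaAt secret (j+1), deltaAt secret (j+2)] ++ [deltaAt secret (j+3)])
        (some 1) none
        = [deltaAt secret (j+1), deltaAt secret (j+2), deltaAt secret (j+3)] := by
      rw [PySem.List.slice_from_one]; rfl
    rw [hcombo, hslice]
    set key : PKey := (deltaAt secret j, deltaAt secret (j+1), deltaAt secret (j+2),
      deltaAt secret (j+3)) with hkeydef
    have hsz := Std.HashSet.size_insert (m := seen1) (k := key)
    have hins : ∀ x : PKey, x ∈ seen1.insert key ↔ x ∈ seen2.insert key := by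
      intro x
      rw [Std.HashSet.mem_insert, Std.HashSet.mem_insert, hss x]
    simp only [mathScan]
    by_cases hmem : key ∈ seen2
    · have hmem1 : key ∈ seen1 := (hss key).mpr hmem
      rw [if_neg (by rw [hsz, if_pos hmem1]; omega), if_pos hmem]
      exact ih (j+1) (seen1.insert key) seen2 bananas
        (fun x => by rw [Std.HashSet.mem_insert, hss x]
                     constructor
                     · rintro (h | h)
                       · exact (beq_iff_eq.mp h) ▸ hmem
                       · exact h
                     · exact Or.inr)
    · have hmem1 : key ∉ seen1 := fun h => hmem ((hss key).mp h)
      rw [if_pos (by rw [hsz, if_neg hmem1]; omega), if_neg hmem]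
      exact ih (j+1) (seen1.insert key) (seen2.insert key) _ hins

lemma aLoop_start (secret : Int) (bananas : Std.HashMap PKey Int) :
    aLoop 2000 secret [] (∅ : Std.HashSet PKey) bananas
      = mathScan secret 1997 0 (∅ : Std.HashSet PKey) bananas := by
  have e1 : evolve secret 1 = stepB^[1] secret := by rw [evolve_one]; rfl
  have e2 : evolve (stepB^[1] secret) 1 = stepB^[2] secret := by
    rw [evolve_one, ← Function.iterate_succ_apply' stepB 1 secret]
  have e3 : evolve (stepB^[2] secret) 1 = stepB^[3] secret := by
    rw [evolve_one, ← Function.iterate_succ_apply' stepB 2 secret]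
  have d1 : PySem.Int.mod (stepB^[1] secret) 10 - PySem.Int.mod secret 10
      = deltaAt secret 0 := by simp [deltaAt, priceAt]
  have d2 : PySem.Int.mod (stepB^[2] secret) 10 - PySem.Int.mod (stepB^[1] secret) 10
      = deltaAt secret 1 := by simp [deltaAt, priceAt]
  have d3 : PySem.Int.mod (stepB^[3] secret) 10 - PySem.Int.mod (stepB^[2] secret) 10
      = deltaAt secret 2 := by simp [deltaAt, priceAt]
  rw [show (2000:Nat) = 1999+1 from rfl, aLoop_succ, e1, d1]
  rw [if_pos (by simp), show (1999:Nat) = 1998+1 from rfl, aLoop_succ, e2, d2]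
  rw [if_pos (by simp), show (1998:Nat) = 1997+1 from rfl, aLoop_succ, e3, d3]
  rw [if_pos (by simp)]
  simp only [List.nil_append, List.cons_append]
  exact aLoop_sim secret 1997 0 ∅ ∅ bananas (fun _ => Iff.rfl)

lemma buildPrices_eq : ∀ (n : Nat) (s : Int) (acc : List Int),
    buildPrices n s acc = acc ++ (List.range n).map (fun j => PySem.Int.mod (stepB^[j+1] s) 10) := by
  intro n
  induction n with
  | zero => intro s acc; simp [buildPrices]
  | succ n ih =>
    intro s acc
    simp only [buildPrices]
    rw [ih, show List.range (n+1) = 0 :: (List.range n).map Nat.succ from List.range_succ_eq_map,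
      List.map_cons, List.map_map, List.append_assoc, List.singleton_append]
    congr 2

lemma prices_eq (secret : Int) :
    buildPrices 2000 secret [PySem.Int.mod secret 10]
      = (List.range 2001).map (priceAt secret) := by
  have h2001 : List.range 2001 = 0 :: (List.range 2000).map Nat.succ := by
    have h := List.range_succ_eq_map (n := 2000)
    norm_num at h
    exact h
  rw [buildPrices_eq, h2001, List.map_cons, List.map_map, List.singleton_append]
  congr 1

lemma pyGetD_prices (secret : Int) (k : Nat) (hk : k < 2001) :
    PySem.List.pyGetD ((List.range 2001).map (priceAt secret)) ((k : Nat) : Int) 0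
      = priceAt secret k := by
  rw [PySem.List.pyGetD_natCast]
  exact PySem.List.getD_map_range (priceAt secret) 2001 k 0 hk

lemma bScan_sim (secret : Int) : ∀ (m j : Nat) (seen : Std.HashSet PKey)
    (bananas : Std.HashMap PKey Int), j + m ≤ 1997 →
    bScan ((List.range 2001).map (priceAt secret))
      ((List.range m).map (fun k => ((j + 4 + k : Nat) : Int))) seen bananas
      = mathScan secret m j seen bananas := by
  intro m
  induction m with
  | zero => intro j seen bananas _; rfl
  | succ m ih =>
    intro j seen bananas hjm
    rw [show List.range (m+1) = 0 :: (List.range m).map Nat.succ from List.range_succ_eq_map,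
      List.map_cons, List.map_map]
    have hkey : bKey ((List.range 2001).map (priceAt secret)) ((j + 4 + 0 : Nat) : Int)
        = (deltaAt secret j, deltaAt secret (j+1), deltaAt secret (j+2), deltaAt secret (j+3)) := by
      unfold bKey deltaAt
      have c0 : ((j + 4 + 0 : Nat) : Int) = ((j+4 : Nat) : Int) := by push_cast; ring
      have c1 : ((j + 4 + 0 : Nat) : Int) - 3 = ((j+1 : Nat) : Int) := by push_cast; ring
      have c2 : ((j + 4 + 0 : Nat) : Int) - 4 = ((j : Nat) : Int) := by push_cast; ring
      have c3 : ((j + 4 + 0 : Nat) : Int) - 2 = ((j+2 : Nat) : Int) := by push_cast; ring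
      have c4 : ((j + 4 + 0 : Nat) : Int) - 1 = ((j+3 : Nat) : Int) := by push_cast; ring
      rw [c1, c2, c3, c4, c0]
      rw [pyGetD_prices secret j (by omega), pyGetD_prices secret (j+1) (by omega),
        pyGetD_prices secret (j+2) (by omega), pyGetD_prices secret (j+3) (by omega),
        pyGetD_prices secret (j+4) (by omega)]
    have hp : PySem.List.pyGetD ((List.range 2001).map (priceAt secret))
        ((j + 4 + 0 : Nat) : Int) 0 = priceAt secret (j+4) :=
      pyGetD_prices secret (j+4) (by omega)
    have htail : (List.range m).map ((fun k => ((j + 4 + k : Nat) : Int)) ∘ Nat.succ)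
        = (List.range m).map (fun k => (((j+1) + 4 + k : Nat) : Int)) := by
      apply List.map_congr_left
      intro k _
      simp only [Function.comp_apply]
      omega
    simp only [bScan]
    rw [hkey, hp, htail]
    simp only [mathScan]
    by_cases hmem : ((deltaAt secret j, deltaAt secret (j+1), deltaAt secret (j+2),
        deltaAt secret (j+3)) : PKey) ∈ seen
    · rw [if_pos ((Std.HashSet.mem_iff_contains).mp hmem), if_pos hmem]
      exact ih (j+1) seen bananas (by omega)
    · rw [if_neg (fun h => hmem ((Std.HashSet.mem_iff_contains).mpr h)), if_neg hmem]
      exact ih (j+1) _ _ (by omega)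

lemma range_conv :
    PySem.List.pyRange 4 2001 1 = (List.range 1997).map (fun k => ((0 + 4 + k : Nat) : Int)) := by
  rw [PySem.List.pyRange_one]
  norm_num
  apply List.map_congr_left
  intro k _
  omega

lemma buyer_eq (secret : Int) (bananas : Std.HashMap PKey Int) :
    aLoop 2000 secret [] (∅ : Std.HashSet PKey) bananas
      = bScan (buildPrices 2000 secret [PySem.Int.mod secret 10])
          (PySem.List.pyRange 4 2001 1) (∅ : Std.HashSet PKey) bananas := by
  rw [prices_eq, range_conv, bScan_sim secret 1997 0 _ _ (by omega), aLoop_start]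

-- ===== VERDICT (by name: the statement is the Claim_ definition above) =====
theorem part_two_spec : Claim_equal_part_two := by
  intro secrets _ _
  unfold Spec_part_two part_two part_two_alt
  have hfold : secrets.foldl
      (fun bananas secret => aLoop 2000 secret [] (∅ : Std.HashSet PKey) bananas)
      (∅ : Std.HashMap PKey Int)
      = secrets.foldl (fun bananas secret =>
          bScan (buildPrices 2000 secret [PySem.Int.mod secret 10])
            (PySem.List.pyRange 4 2001 1) (∅ : Std.HashSet PKey) bananas)
      (∅ : Std.HashMap PKey Int) :=
    PySem.List.foldl_congr_mem secrets _ _ _ (fun acc x _ => buyer_eq x acc)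
  rw [hfold]
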